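-- pv_equiv track=rewrite | github.com/tinotendamaisiri/neriah-ai | functions/teacher_assistant.py | extract_student_name_from_message
-- ===== SOURCE A (Python) =====
-- def _edit_distance(a: str, b: str) -> int:
--     """Standard Levenshtein edit distance."""
--     if not a:
--         return len(b)
--     if not b:
--         return len(a)
--     dp = list(range(len(b) + 1))
--     for ca in a:
--         ndp = [dp[0] + 1]
--         for j, cb in enumerate(b):
--             ndp.append(min(dp[j] + (ca != cb), dp[j + 1] + 1, ndp[j] + 1))
--         dp = ndp
--     return dp[-1]
--
-- def extract_student_name_from_message(
--     message: str, known_students: list[dict]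
-- ) -> dict | None:
--     """
--     Check if the teacher's message references a specific student.
--     Tries exact full-name match, then first/surname match, then fuzzy (edit-distance ≤ 1).
--     Returns the matched student dict or None.
--     """
--     msg = message.lower()
--
--     for student in known_students:
--         first   = student.get("first_name", "").strip().lower()
--         surname = student.get("surname", "").strip().lower()
--         full    = f"{first} {surname}".strip()
--
--         if full and full in msg:
--             return student
--         if first and first in msg:
--             return student
--         if surname and surname in msg:
--             return student
--
--         # Fuzzy: any word in the message within edit-distance 1 of first or surname
--         for word in msg.split():
--             if len(word) >= 4:
--                 if (first  and _edit_distance(word, first)   <= 1) or \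
--                    (surname and _edit_distance(word, surname) <= 1):
--                     return student
--
--     return None
-- ===== SOURCE B (Python) =====
-- def _within1(a: str, b: str) -> bool:
--     """True iff Levenshtein distance between a and b is <= 1 (bounded check, no DP table)."""
--     i = 0
--     while i < len(a) and i < len(b) and a[i] == b[i]:
--         i += 1
--     a, b = a[i:], b[i:]
--     if not a:
--         return len(b) <= 1
--     if not b:
--         return len(a) <= 1
--     # first characters differ: one substitution, deletion or insertion must finish the job
--     return a[1:] == b[1:] or a[1:] == b or a == b[1:]
--
-- def extract_student_name_from_message(
--     message: str, known_students: list[dict]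
-- ) -> dict | None:
--     msg = message.lower()
--     fuzzy_words = [w for w in msg.split() if len(w) >= 4]
--
--     for student in known_students:
--         first   = student.get("first_name", "").strip().lower()
--         surname = student.get("surname", "").strip().lower()
--         full    = (first + " " + surname).strip()
--
--         if (full and full in msg) or (first and first in msg) or (surname and surname in msg):
--             return student
--         if any((first and _within1(w, first)) or (surname and _within1(w, surname))
--                for w in fuzzy_words):
--             return student
--
--     return None
-- ===== Notes on version B (the rewrite author's own statement) =====
-- stated objective: faster
-- what changed: The Levenshtein DP table helper is replaced by a bounded edit-distance-at-most-1 test (strip the common prefix, then a single substitution/insertion/deletion must reconcile the rest), and the message is split into candidate words once before the student loop instead of once per student.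
import Mathlib
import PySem

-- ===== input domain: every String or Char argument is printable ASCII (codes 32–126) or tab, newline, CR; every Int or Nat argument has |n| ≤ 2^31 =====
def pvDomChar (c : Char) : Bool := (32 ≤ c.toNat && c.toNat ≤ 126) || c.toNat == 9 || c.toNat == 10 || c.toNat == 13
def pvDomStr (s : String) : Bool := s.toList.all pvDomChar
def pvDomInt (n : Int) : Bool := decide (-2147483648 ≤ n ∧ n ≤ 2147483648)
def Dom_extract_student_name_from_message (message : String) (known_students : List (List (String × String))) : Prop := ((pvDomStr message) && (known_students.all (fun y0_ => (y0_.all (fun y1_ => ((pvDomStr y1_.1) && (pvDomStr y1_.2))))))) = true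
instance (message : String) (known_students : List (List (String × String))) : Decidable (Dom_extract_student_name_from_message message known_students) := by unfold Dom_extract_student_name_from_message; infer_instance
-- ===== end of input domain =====

-- B replaces A's full Levenshtein DP table with a bounded edit-distance-≤1 check (strip common
-- prefix, then one substitution/insertion/deletion must finish) and hoists the word split out of
-- the student loop; objective: simpler/faster helper, same return value everywhere.

-- ===== PORT A =====
-- inner loop body of _edit_distance: ndp.append(min(dp[j] + (ca != cb), dp[j+1] + 1, ndp[j] + 1))
def pvInnerA (dp : List Nat) (ca : Char) (ndp : List Nat) (p : Int × Char) : List Nat :=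
  ndp ++ [min (min (PySem.List.pyGetD dp p.1 0 + (if ca ≠ p.2 then 1 else 0))
                   (PySem.List.pyGetD dp (p.1 + 1) 0 + 1))
              (PySem.List.pyGetD ndp p.1 0 + 1)]

-- one iteration of `for ca in a`: ndp = [dp[0] + 1]; for j, cb in enumerate(b): …; dp = ndp
def pvStepA (b : List Char) (dp : List Nat) (ca : Char) : List Nat :=
  (PySem.List.enumerate b).foldl (pvInnerA dp ca) [PySem.List.pyGetD dp 0 0 + 1]

-- port of _edit_distance (indices are always in range: dp has length len(b)+1 throughout)
def pvEdA (a b : List Char) : Nat :=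
  if a.isEmpty then b.length
  else if b.isEmpty then a.length
  else PySem.List.pyGetD (a.foldl (pvStepA b) (List.range (b.length + 1))) (-1) 0

-- fuzzy condition of A: (first and _edit_distance(word, first) <= 1) or (surname and …)
def pvFuzzyA (first surname word : List Char) : Bool :=
  (!first.isEmpty && decide (pvEdA word first ≤ 1)) ||
  (!surname.isEmpty && decide (pvEdA word surname ≤ 1))

-- the `for student in known_students` loop with its early returns
def pvGoA (msg : List Char) : List (List (String × String)) → Option (List (String × String))
  | [] => none
  | student :: rest =>
    let first := PySem.Chars.lower (PySem.Chars.strip ((PySem.Dict.mk student).getD "first_name" "").toList)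
    let surname := PySem.Chars.lower (PySem.Chars.strip ((PySem.Dict.mk student).getD "surname" "").toList)
    let full := PySem.Chars.strip (first ++ ' ' :: surname)
    if !full.isEmpty && PySem.Chars.isIn full msg then some student
    else if !first.isEmpty && PySem.Chars.isIn first msg then some student
    else if !surname.isEmpty && PySem.Chars.isIn surname msg then some student
    else if (PySem.Chars.split₀ msg).any (fun word => decide (4 ≤ word.length) && pvFuzzyA first surname word) then some student
    else pvGoA msg rest

def extract_student_name_from_message (message : String) (known_students : List (List (String × String))) : Option (List (String × String)) :=
  pvGoA (PySem.Chars.lower message.toList) known_students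

-- ===== PORT B =====
-- port of _within1: the strip-common-prefix while loop is the recursion; then the empty checks
-- and the three one-edit checks a[1:]==b[1:] / a[1:]==b / a==b[1:]
def pvWithin1 : List Char → List Char → Bool
  | [], b => decide (b.length ≤ 1)
  | c :: a', [] => decide ((c :: a').length ≤ 1)
  | c :: a', d :: b' =>
    if c = d then pvWithin1 a' b'
    else a' == b' || a' == d :: b' || (c :: a') == b'

def pvFuzzyB (first surname w : List Char) : Bool :=
  (!first.isEmpty && pvWithin1 w first) || (!surname.isEmpty && pvWithin1 w surname)

def pvGoB (msg : List Char) (fuzzy_words : List (List Char)) : List (List (String × String)) → Option (List (String × String))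
  | [] => none
  | student :: rest =>
    let first := PySem.Chars.lower (PySem.Chars.strip ((PySem.Dict.mk student).getD "first_name" "").toList)
    let surname := PySem.Chars.lower (PySem.Chars.strip ((PySem.Dict.mk student).getD "surname" "").toList)
    let full := PySem.Chars.strip (first ++ ' ' :: surname)
    if (!full.isEmpty && PySem.Chars.isIn full msg) ||
       (!first.isEmpty && PySem.Chars.isIn first msg) ||
       (!surname.isEmpty && PySem.Chars.isIn surname msg) then some student
    else if fuzzy_words.any (pvFuzzyB first surname) then some student
    else pvGoB msg fuzzy_words rest

def extract_student_name_from_message_alt (message : String) (known_students : List (List (String × String))) : Option (List (String × String)) :=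
  let msg := PySem.Chars.lower message.toList
  let fuzzy_words := (PySem.Chars.split₀ msg).filter (fun w => decide (4 ≤ w.length))
  pvGoB msg fuzzy_words known_students

-- ===== PRECONDITION & SPEC =====
def Spec_extract_student_name_from_message (message : String) (known_students : List (List (String × String))) (out : Option (List (String × String))) : Prop := out = extract_student_name_from_message_alt message known_students
instance (message : String) (known_students : List (List (String × String))) (out : Option (List (String × String))) : Decidable (Spec_extract_student_name_from_message message known_students out) := by unfold Spec_extract_student_name_from_message; infer_instance

-- ===== CLAIM (what is proved, stated in full; the proofs are below) =====
def Claim_equal_extract_student_name_from_message : Prop := ∀ (message : String) (known_students : List (List (String × String))), Dom_extract_student_name_from_message message known_students → Spec_extract_student_name_from_message message known_students (extract_student_name_from_message message known_students)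

-- ===== LEMMAS AND PROOFS =====

-- reference Levenshtein distance, first-character recursion
def pvLev : List Char → List Char → Nat
  | [], b => b.length
  | a, [] => a.length
  | c :: a, d :: b =>
    min (min (pvLev a b + (if c = d then 0 else 1)) (pvLev a (d :: b) + 1)) (pvLev (c :: a) b + 1)
termination_by a b => a.length + b.length
decreasing_by all_goals (simp only [List.length_cons]; omega)

theorem pvLev_nil_left (b : List Char) : pvLev [] b = b.length := by simp [pvLev]

theorem pvLev_nil_right (a : List Char) : pvLev a [] = a.length := by
  cases a <;> simp [pvLev]

theorem pvLev_cons_cons (c d : Char) (a b : List Char) :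
    pvLev (c :: a) (d :: b) =
      min (min (pvLev a b + (if c = d then 0 else 1)) (pvLev a (d :: b) + 1)) (pvLev (c :: a) b + 1) := by
  simp [pvLev]

-- removing / adding one character changes the distance by at most one
theorem pvLev_le_cons_left (c : Char) (a b : List Char) : pvLev (c :: a) b ≤ pvLev a b + 1 := by
  cases b with
  | nil => simp [pvLev_nil_right]
  | cons d b' => rw [pvLev_cons_cons]; omega

theorem pvLev_le_cons_right (c : Char) (a b : List Char) : pvLev a (c :: b) ≤ pvLev a b + 1 := by
  cases a with
  | nil => simp [pvLev_nil_left]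
  | cons e a' => rw [pvLev_cons_cons]; omega

theorem pvLev_cons_left_le (c : Char) (a b : List Char) : pvLev a b ≤ pvLev (c :: a) b + 1 := by
  induction b generalizing a with
  | nil => simp [pvLev_nil_right]; omega
  | cons d b' ih =>
    rw [pvLev_cons_cons]
    have h1 := pvLev_le_cons_right d a b'
    have h2 := ih a
    omega

theorem pvLev_cons_right_le (c : Char) (a b : List Char) : pvLev a b ≤ pvLev a (c :: b) + 1 := by
  induction a generalizing b with
  | nil => simp [pvLev_nil_left]; omega
  | cons e a' ih =>
    rw [pvLev_cons_cons]
    have h1 := pvLev_le_cons_left e a' b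
    have h2 := ih b
    omega

theorem pvLev_strip (c : Char) (a b : List Char) : pvLev (c :: a) (c :: b) = pvLev a b := by
  rw [pvLev_cons_cons]
  have h1 := pvLev_cons_right_le c a b
  have h2 := pvLev_cons_left_le c a b
  simp only [if_pos]
  omega

theorem pvLev_self (a : List Char) : pvLev a a = 0 := by
  induction a with
  | nil => simp [pvLev_nil_left]
  | cons c a' ih => rw [pvLev_strip]; exact ih

theorem pvLev_eq_zero_iff (a b : List Char) : pvLev a b = 0 ↔ a = b := by
  constructor
  · intro h
    induction a generalizing b with
    | nil => cases b with
      | nil => rfl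
      | cons d b' => simp [pvLev_nil_left] at h
    | cons c a' ih =>
      cases b with
      | nil => simp [pvLev_nil_right] at h
      | cons d b' =>
        rw [pvLev_cons_cons] at h
        by_cases hcd : c = d
        · subst hcd
          have h1 := pvLev_cons_right_le c a' b'
          have h2 := pvLev_cons_left_le c a' b'
          have : pvLev a' b' = 0 := by simp at h; omega
          exact congrArg (c :: ·) (ih b' this)
        · rw [if_neg hcd] at h; omega
  · rintro rfl; exact pvLev_self a

-- one-edit characterisation (used for reversal symmetry of "distance ≤ 1")
def pvP (a b : List Char) : Prop :=
  a = b ∨ (∃ p c d s, a = p ++ c :: s ∧ b = p ++ d :: s) ∨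
    (∃ p c s, a = p ++ c :: s ∧ b = p ++ s) ∨ (∃ p c s, a = p ++ s ∧ b = p ++ c :: s)

theorem pvP_rev {a b : List Char} (h : pvP a b) : pvP a.reverse b.reverse := by
  rcases h with rfl | ⟨p, c, d, s, rfl, rfl⟩ | ⟨p, c, s, rfl, rfl⟩ | ⟨p, c, s, rfl, rfl⟩
  · exact Or.inl rfl
  · exact Or.inr (Or.inl ⟨s.reverse, c, d, p.reverse, by simp, by simp⟩)
  · exact Or.inr (Or.inr (Or.inl ⟨s.reverse, c, p.reverse, by simp, by simp⟩))
  · exact Or.inr (Or.inr (Or.inr ⟨s.reverse, c, p.reverse, by simp, by simp⟩))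

theorem pvP_cons_iff (x : Char) (a b : List Char) : pvP (x :: a) (x :: b) ↔ pvP a b := by
  constructor
  · rintro (h | ⟨p, c, d, s, h1, h2⟩ | ⟨p, c, s, h1, h2⟩ | ⟨p, c, s, h1, h2⟩)
    · exact Or.inl (by injection h)
    · cases p with
      | nil => simp at h1 h2; exact Or.inl (h1.2.trans h2.2.symm)
      | cons e p' =>
        simp at h1 h2
        exact Or.inr (Or.inl ⟨p', c, d, s, h1.2, h2.2⟩)
    · cases p with
      | nil =>
        simp only [List.nil_append] at h1 h2
        obtain ⟨rfl, rfl⟩ : x = c ∧ a = s := by injection h1 with u v; exact ⟨u, v⟩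
        exact Or.inr (Or.inr (Or.inl ⟨[], x, b, h2.symm, rfl⟩))
      | cons e p' =>
        simp at h1 h2
        exact Or.inr (Or.inr (Or.inl ⟨p', c, s, h1.2, h2.2⟩))
    · cases p with
      | nil =>
        simp only [List.nil_append] at h1 h2
        obtain ⟨rfl, rfl⟩ : x = c ∧ b = s := by injection h2 with u v; exact ⟨u, v⟩
        exact Or.inr (Or.inr (Or.inr ⟨[], x, a, rfl, h1.symm⟩))
      | cons e p' =>
        simp at h1 h2
        exact Or.inr (Or.inr (Or.inr ⟨p', c, s, h1.2, h2.2⟩))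
  · rintro (rfl | ⟨p, c, d, s, rfl, rfl⟩ | ⟨p, c, s, rfl, rfl⟩ | ⟨p, c, s, rfl, rfl⟩)
    · exact Or.inl rfl
    · exact Or.inr (Or.inl ⟨x :: p, c, d, s, rfl, rfl⟩)
    · exact Or.inr (Or.inr (Or.inl ⟨x :: p, c, s, rfl, rfl⟩))
    · exact Or.inr (Or.inr (Or.inr ⟨x :: p, c, s, rfl, rfl⟩))

theorem pvLev_sub_le (p s : List Char) (c d : Char) : pvLev (p ++ c :: s) (p ++ d :: s) ≤ 1 := by
  induction p with
  | nil =>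
    simp only [List.nil_append]
    rw [pvLev_cons_cons]
    have := pvLev_self s
    by_cases hcd : c = d <;> simp [hcd] <;> omega
  | cons e p' ih => simpa [pvLev_strip] using ih

theorem pvLev_del_le (p s : List Char) (c : Char) : pvLev (p ++ c :: s) (p ++ s) ≤ 1 := by
  induction p with
  | nil =>
    simp only [List.nil_append]
    cases s with
    | nil => simp [pvLev_nil_right]
    | cons e s' =>
      rw [pvLev_cons_cons]
      have := pvLev_self (e :: s')
      omega
  | cons e p' ih => simpa [pvLev_strip] using ih

theorem pvLev_ins_le (p s : List Char) (c : Char) : pvLev (p ++ s) (p ++ c :: s) ≤ 1 := by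
  induction p with
  | nil =>
    simp only [List.nil_append]
    cases s with
    | nil => simp [pvLev_nil_left]
    | cons e s' =>
      rw [pvLev_cons_cons]
      have := pvLev_self (e :: s')
      omega
  | cons e p' ih => simpa [pvLev_strip] using ih

theorem pvLev_le_one_iff_P (a b : List Char) : pvLev a b ≤ 1 ↔ pvP a b := by
  constructor
  · intro h
    induction a generalizing b with
    | nil =>
      rw [pvLev_nil_left] at h
      cases b with
      | nil => exact Or.inl rfl
      | cons d b' =>
        have : b' = [] := by simpa using h
        subst this
        exact Or.inr (Or.inr (Or.inr ⟨[], d, [], rfl, rfl⟩))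
    | cons c a' ih =>
      cases b with
      | nil =>
        rw [pvLev_nil_right] at h
        have : a' = [] := by simpa using h
        subst this
        exact Or.inr (Or.inr (Or.inl ⟨[], c, [], rfl, rfl⟩))
      | cons d b' =>
        by_cases hcd : c = d
        · subst hcd
          rw [pvLev_strip] at h
          exact (pvP_cons_iff c a' b').2 (ih b' h)
        · rw [pvLev_cons_cons, if_neg hcd] at h
          have h3 : pvLev a' b' = 0 ∨ pvLev a' (d :: b') = 0 ∨ pvLev (c :: a') b' = 0 := by omega
          rcases h3 with h3 | h3 | h3
          · exact Or.inr (Or.inl ⟨[], c, d, b', by simp [(pvLev_eq_zero_iff _ _).1 h3], rfl⟩)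
          · exact Or.inr (Or.inr (Or.inl ⟨[], c, d :: b', by simp [(pvLev_eq_zero_iff _ _).1 h3], rfl⟩))
          · exact Or.inr (Or.inr (Or.inr ⟨[], d, c :: a', rfl, by simp [← (pvLev_eq_zero_iff _ _).1 h3]⟩))
  · rintro (rfl | ⟨p, c, d, s, rfl, rfl⟩ | ⟨p, c, s, rfl, rfl⟩ | ⟨p, c, s, rfl, rfl⟩)
    · simp [pvLev_self]
    · exact pvLev_sub_le p s c d
    · exact pvLev_del_le p s c
    · exact pvLev_ins_le p s c

theorem pvLev_le_one_rev (a b : List Char) : pvLev a.reverse b.reverse ≤ 1 ↔ pvLev a b ≤ 1 := by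
  rw [pvLev_le_one_iff_P, pvLev_le_one_iff_P]
  constructor
  · intro h; simpa using pvP_rev h
  · exact pvP_rev

-- the bounded check computes exactly "distance ≤ 1"
theorem pvLev_le_one_iff_within1 (a b : List Char) : pvLev a b ≤ 1 ↔ pvWithin1 a b = true := by
  induction a generalizing b with
  | nil => simp [pvLev_nil_left, pvWithin1]
  | cons c a' ih =>
    cases b with
    | nil => simp [pvLev_nil_right, pvWithin1]
    | cons d b' =>
      by_cases hcd : c = d
      · subst hcd
        rw [pvLev_strip]
        simp only [pvWithin1, if_pos]
        exact ih b'
      · rw [pvLev_cons_cons, if_neg hcd]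
        simp only [pvWithin1, if_neg hcd]
        have e1 := pvLev_eq_zero_iff a' b'
        have e2 := pvLev_eq_zero_iff a' (d :: b')
        have e3 := pvLev_eq_zero_iff (c :: a') b'
        constructor
        · intro h
          have : pvLev a' b' = 0 ∨ pvLev a' (d :: b') = 0 ∨ pvLev (c :: a') b' = 0 := by omega
          rcases this with h3 | h3 | h3
          · simp [e1.1 h3]
          · simp [e2.1 h3]
          · simp [e3.1 h3]
        · intro h
          simp only [Bool.or_eq_true, beq_iff_eq] at h
          rcases h with (h | h) | h
          · have : pvLev a' b' = 0 := e1.2 h; omega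
          · have : pvLev a' (d :: b') = 0 := e2.2 h; omega
          · have : pvLev (c :: a') b' = 0 := e3.2 h; omega

-- ===== DP row invariant: the port of _edit_distance computes pvLev on the reversed strings =====

theorem pvInner_inv (ca : Char) (b : List Char) (dpf gf : Nat → Nat) (dp : List Nat)
    (hdp : dp = (List.range (b.length + 1)).map dpf)
    (hrec : ∀ j (h : j < b.length),
      gf (j + 1) = min (min (dpf j + (if ca ≠ b[j] then 1 else 0)) (dpf (j + 1) + 1)) (gf j + 1)) :
    ∀ (b2 : List Char) (k : Nat), k + b2.length = b.length → b.drop k = b2 →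
      (PySem.List.enumerate b2 k).foldl (pvInnerA dp ca) ((List.range (k + 1)).map gf) =
        (List.range (b.length + 1)).map gf := by
  intro b2
  induction b2 with
  | nil =>
    intro k hk _
    have : k = b.length := by simpa using hk
    subst this
    rw [PySem.List.enumerate_nil]
    rfl
  | cons cb b2' ih =>
    intro k hk hdrop
    have hklt : k < b.length := by simp at hk; omega
    have hbk : b[k] = cb := by
      have h1 : (List.drop k b)[0]? = some cb := by rw [hdrop]; rfl
      rw [List.getElem?_drop] at h1
      simp only [Nat.add_zero] at h1
      exact (List.getElem_eq_iff hklt).mpr h1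
    rw [PySem.List.enumerate_cons, List.foldl_cons]
    have hstep : pvInnerA dp ca ((List.range (k + 1)).map gf) ((k : Int), cb) =
        (List.range (k + 2)).map gf := by
      unfold pvInnerA
      have l1 : PySem.List.pyGetD dp (k : Int) 0 = dpf k := by
        rw [PySem.List.pyGetD_natCast, hdp, PySem.List.getD_map_range _ _ _ _ (by omega)]
      have l2 : PySem.List.pyGetD dp ((k : Int) + 1) 0 = dpf (k + 1) := by
        have : ((k : Int) + 1) = ((k + 1 : Nat) : Int) := by push_cast; ring
        rw [this, PySem.List.pyGetD_natCast, hdp, PySem.List.getD_map_range _ _ _ _ (by omega)]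
      have l3 : PySem.List.pyGetD ((List.range (k + 1)).map gf) (k : Int) 0 = gf k := by
        rw [PySem.List.pyGetD_natCast, PySem.List.getD_map_range _ _ _ _ (by omega)]
      simp only [l1, l2, l3]
      have : (List.range (k + 2)) = List.range (k + 1) ++ [k + 1] := List.range_succ
      rw [this, List.map_append]
      simp only [List.map_cons, List.map_nil]
      congr 2
      rw [hrec k hklt, hbk]
    rw [hstep]
    have hcast : (k : Int) + 1 = ((k + 1 : Nat) : Int) := by push_cast; ring
    rw [hcast]
    have hdrop' : b.drop (k + 1) = b2' := by rw [← List.drop_drop, hdrop]; rfl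
    exact ih (k + 1) (by simp at hk ⊢; omega) hdrop'

theorem pvStep_inv (b : List Char) (ca : Char) (p : List Char) :
    pvStepA b ((List.range (b.length + 1)).map (fun j => pvLev p.reverse ((b.take j).reverse))) ca =
      (List.range (b.length + 1)).map (fun j => pvLev (p ++ [ca]).reverse ((b.take j).reverse)) := by
  unfold pvStepA
  have h0 : [PySem.List.pyGetD ((List.range (b.length + 1)).map (fun j => pvLev p.reverse ((b.take j).reverse))) 0 0 + 1] =
      (List.range (0 + 1)).map (fun j => pvLev (p ++ [ca]).reverse ((b.take j).reverse)) := by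
    rw [PySem.List.pyGetD_zero, PySem.List.getD_map_range _ _ _ _ (by omega)]
    simp [pvLev_nil_right]
  rw [h0]
  have := pvInner_inv ca b (fun j => pvLev p.reverse ((b.take j).reverse))
    (fun j => pvLev (p ++ [ca]).reverse ((b.take j).reverse))
    ((List.range (b.length + 1)).map (fun j => pvLev p.reverse ((b.take j).reverse))) rfl
    ?_ b 0 (by simp) (by simp)
  · simpa using this
  · intro j hj
    have ht : b.take (j + 1) = b.take j ++ [b[j]] := by
      rw [List.take_add_one, List.getElem?_eq_getElem hj]
      rfl
    simp only [ht, List.reverse_append, List.reverse_cons, List.reverse_nil, List.nil_append,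
      List.singleton_append]
    rw [pvLev_cons_cons]
    by_cases hc : ca = b[j] <;> simp [hc]

theorem pvEdA_eq_pvLev_rev (a b : List Char) : pvEdA a b = pvLev a.reverse b.reverse := by
  unfold pvEdA
  by_cases ha : a.isEmpty
  · have : a = [] := by simpa using ha
    subst this
    simp [pvLev_nil_left]
  · rw [if_neg ha]
    by_cases hb : b.isEmpty
    · have : b = [] := by simpa using hb
      subst this
      simp [pvLev_nil_right]
    · rw [if_neg hb]
      have main : ∀ p : List Char, p.foldl (pvStepA b) (List.range (b.length + 1)) =
          (List.range (b.length + 1)).map (fun j => pvLev p.reverse ((b.take j).reverse)) := by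
        intro p
        induction p using List.reverseRecOn with
        | nil =>
          apply List.ext_getElem (by simp)
          intro i h1 h2
          simp only [List.foldl_nil, List.getElem_map, List.getElem_range, List.reverse_nil,
            pvLev_nil_left, List.length_reverse, List.length_take]
          simp only [List.foldl_nil, List.length_range] at h1
          omega
        | append_singleton p ca ih =>
          rw [List.foldl_append, List.foldl_cons, List.foldl_nil, ih, pvStep_inv]
      rw [main a]
      have hne : (List.range (b.length + 1)).map (fun j => pvLev a.reverse ((b.take j).reverse)) ≠ [] := by
        simp
      rw [PySem.List.pyGetD_neg_one _ _ hne, List.getLast_eq_getElem]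
      simp only [List.getElem_map, List.getElem_range, List.length_map, List.length_range,
        Nat.add_sub_cancel, List.take_length]

theorem pvEdA_le_one_iff_within1 (a b : List Char) : (pvEdA a b ≤ 1) ↔ pvWithin1 a b = true := by
  rw [pvEdA_eq_pvLev_rev, pvLev_le_one_rev]
  exact pvLev_le_one_iff_within1 a b

theorem pvFuzzy_eq (first surname w : List Char) : pvFuzzyA first surname w = pvFuzzyB first surname w := by
  unfold pvFuzzyA pvFuzzyB
  have h1 := pvEdA_le_one_iff_within1 w first
  have h2 := pvEdA_le_one_iff_within1 w surname
  by_cases e1 : pvEdA w first ≤ 1 <;> by_cases e2 : pvEdA w surname ≤ 1 <;>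
    simp_all

theorem pvBranch_eq (msg first surname full : List Char) (student : List (String × String))
    (recA recB : Option (List (String × String))) (hrec : recA = recB) :
    (if !full.isEmpty && PySem.Chars.isIn full msg then some student
     else if !first.isEmpty && PySem.Chars.isIn first msg then some student
     else if !surname.isEmpty && PySem.Chars.isIn surname msg then some student
     else if (PySem.Chars.split₀ msg).any (fun word => decide (4 ≤ word.length) && pvFuzzyA first surname word) then some student
     else recA) =
    (if (!full.isEmpty && PySem.Chars.isIn full msg) ||
        (!first.isEmpty && PySem.Chars.isIn first msg) ||
        (!surname.isEmpty && PySem.Chars.isIn surname msg) then some student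
     else if ((PySem.Chars.split₀ msg).filter (fun w => decide (4 ≤ w.length))).any (pvFuzzyB first surname) then some student
     else recB) := by
  have hf : ((PySem.Chars.split₀ msg).filter (fun w => decide (4 ≤ w.length))).any (pvFuzzyB first surname) =
      (PySem.Chars.split₀ msg).any (fun word => decide (4 ≤ word.length) && pvFuzzyA first surname word) := by
    rw [List.any_filter]
    have : (fun x => decide (4 ≤ x.length) && pvFuzzyB first surname x) =
        (fun word => decide (4 ≤ word.length) && pvFuzzyA first surname word) := by
      funext w
      rw [pvFuzzy_eq]
    rw [this]
  rw [hf, hrec]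
  cases h1 : (!full.isEmpty && PySem.Chars.isIn full msg) <;>
    cases h2 : (!first.isEmpty && PySem.Chars.isIn first msg) <;>
      cases h3 : (!surname.isEmpty && PySem.Chars.isIn surname msg) <;> simp

theorem pvGo_eq (msg : List Char) (ks : List (List (String × String))) :
    pvGoA msg ks =
      pvGoB msg ((PySem.Chars.split₀ msg).filter (fun w => decide (4 ≤ w.length))) ks := by
  induction ks with
  | nil => rfl
  | cons student rest ih =>
    rw [pvGoA, pvGoB]
    exact pvBranch_eq _ _ _ _ _ _ _ ih

-- ===== VERDICT (by name: the statement is the Claim_ definition above) =====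
theorem extract_student_name_from_message_spec : Claim_equal_extract_student_name_from_message := by
  intro message known_students _
  unfold Spec_extract_student_name_from_message extract_student_name_from_message extract_student_name_from_message_alt
  exact pvGo_eq _ _
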